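-- pv_equiv track=rewrite | github.com/rickardlind/avltree | tests.py | rexp
-- ===== SOURCE A (Python) =====
-- def rexp(s: str):
--     """
--     Parse range expression.
--     """
--     if ',' in s:
--         for e in s.split(','):
--             yield from rexp(e)
--
--     elif '-' in s:
--         l, h = s.split('-', maxsplit=1)
--         yield from range(int(l), int(h) + 1)
--
--     else:
--         yield int(s)
-- ===== SOURCE B (Python) =====
-- def rexp(s: str):
--     """
--     Parse range expression.
--     """
--     for t in s.split(','):
--         i = t.find('-')
--         if i < 0:
--             lo = int(t)
--             hi = lo
--         else:
--             lo = int(t[:i])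
--             hi = int(t[i + 1:])
--         yield from range(lo, hi + 1)
-- ===== Notes on version B (the rewrite author's own statement) =====
-- stated objective: simpler
-- what changed: Replaces A's self-recursion and conditional '-'-split with a single flat loop over s.split(',') that normalizes every token to an (lo, hi) interval via t.find('-') and slicing, then expands it with one uniform range(lo, hi+1).
import Mathlib
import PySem

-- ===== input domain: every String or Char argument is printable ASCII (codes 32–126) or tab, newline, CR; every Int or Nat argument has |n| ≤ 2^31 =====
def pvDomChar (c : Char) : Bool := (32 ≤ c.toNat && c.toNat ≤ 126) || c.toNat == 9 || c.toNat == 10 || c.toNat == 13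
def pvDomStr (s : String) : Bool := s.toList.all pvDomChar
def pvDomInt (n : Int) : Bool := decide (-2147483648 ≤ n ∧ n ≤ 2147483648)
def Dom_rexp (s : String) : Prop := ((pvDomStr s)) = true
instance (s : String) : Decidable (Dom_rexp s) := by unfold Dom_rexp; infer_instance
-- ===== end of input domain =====

-- B replaces A's self-recursion with a flat loop that normalizes every comma-separated
-- token to an (lo, hi) interval via str.find/slicing (no '-'-split, no recursion) and
-- expands it with range: a different decomposition of the same parsing task.


-- ===== PORT A =====
-- A is a generator; the port returns the list of all yielded values (Pre_ excludes inputs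
-- on which the generator raises, so the partial-yield prefix before an exception is not claimed).
-- A recurses on the comma-separated pieces; the port mirrors that recursion with a fuel
-- totality guard (fuel s.length + 1 is always enough: pieces of a comma-split are comma-free).
def rexpGo : Nat → List Char → List Int
  | 0, _ => []
  | fuel + 1, cs =>
    if PySem.Chars.isIn [','] cs then
      (PySem.Chars.splitOn cs [',']).flatMap (fun e => rexpGo fuel e)
    else if PySem.Chars.isIn ['-'] cs then
      -- l, h = s.split('-', maxsplit=1); yield from range(int(l), int(h) + 1)
      match PySem.Chars.splitOnMax cs ['-'] 1 with
      | [l, h] =>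
        match PySem.Int.ofChars? l, PySem.Int.ofChars? h with
        | some a, some b => PySem.List.pyRange a (b + 1) 1
        | _, _ => []          -- int() raised: outside Pre_
      | _ => []               -- unreachable: split('-', 1) with '-' present yields 2 parts
    else
      -- yield int(s)
      match PySem.Int.ofChars? cs with
      | some v => [v]
      | none => []            -- int() raised: outside Pre_

def rexp (s : String) : List Int := rexpGo (s.toList.length + 1) s.toList

-- ===== PORT B =====
-- i = t.find('-'); lo/hi from i < 0 or slices t[:i], t[i+1:]; result is range(lo, hi+1).
-- none = an int() of B raised (outside Pre_).
def rexpBounds (t : List Char) : Option (Int × Int) :=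
  let i := PySem.Chars.find t ['-']
  if i < 0 then
    match PySem.Int.ofChars? t with
    | some v => some (v, v)
    | none => none
  else
    match PySem.Int.ofChars? (PySem.List.slice t none (some i)),
          PySem.Int.ofChars? (PySem.List.slice t (some (i + 1)) none) with
    | some lo, some hi => some (lo, hi)
    | _, _ => none

def rexp_alt (s : String) : List Int :=
  (PySem.Chars.splitOn s.toList [',']).flatMap (fun t =>
    match rexpBounds t with
    | some (lo, hi) => PySem.List.pyRange lo (hi + 1) 1
    | none => [])

-- ===== PRECONDITION & SPEC =====
-- Pre_ excludes exactly the inputs on which A raises ValueError: a comma-separated token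
-- that is not int()-parsable (for a token containing '-', either side of its first '-').
def Pre_rexp (s : String) : Prop :=
  ∀ t ∈ PySem.Chars.splitOn s.toList [','],
    if PySem.Chars.isIn ['-'] t then
      (PySem.Int.ofChars? ((PySem.Chars.splitOnMax t ['-'] 1).getD 0 [])).isSome = true ∧
      (PySem.Int.ofChars? ((PySem.Chars.splitOnMax t ['-'] 1).getD 1 [])).isSome = true
    else
      (PySem.Int.ofChars? t).isSome = true
instance (s : String) : Decidable (Pre_rexp s) := by unfold Pre_rexp; infer_instance

def pvWitness_rexp : String := "1-3, 7"

def Spec_rexp (s : String) (out : List Int) : Prop := out = rexp_alt s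
instance (s : String) (out : List Int) : Decidable (Spec_rexp s out) := by unfold Spec_rexp; infer_instance

-- ===== CLAIM (what is proved, stated in full; the proofs are below) =====
def Claim_equal_rexp : Prop := ∀ (s : String), Dom_rexp s → Pre_rexp s → Spec_rexp s (rexp s)

-- ===== LEMMAS AND PROOFS =====

-- a one-char needle occurs as an infix iff it is a member
theorem singleton_infix_iff (c : Char) (l : List Char) : [c] <:+: l ↔ c ∈ l := by
  constructor
  · intro ⟨p, q, h⟩; subst h; simp
  · intro h
    obtain ⟨p, q, h⟩ := List.append_of_mem h
    exact ⟨p, q, by simp [h]⟩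

-- find of a one-char needle at its first occurrence
theorem findGo_first (p q : List Char) (c : Char) (hp : c ∉ p) :
    ∀ k, PySem.Chars.find.go [c] (p ++ c :: q) k = k + p.length := by
  induction p with
  | nil => intro k; simp [PySem.Chars.find.go, List.isPrefixOf]
  | cons a p ih =>
    intro k
    have ha : a ≠ c := fun h => hp (by simp [h])
    simp only [List.cons_append, PySem.Chars.find.go]
    rw [ih (fun h => hp (List.mem_cons_of_mem _ h)) (k + 1)]
    simp [Ne.symm ha]; omega

theorem find_first (p q : List Char) (c : Char) (hp : c ∉ p) :
    PySem.Chars.find (p ++ c :: q) [c] = (p.length : Int) := by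
  unfold PySem.Chars.find
  rw [findGo_first p q c hp 0]; simp

-- split('-', maxsplit=1) on p ++ '-' :: q with '-'-free p gives exactly [p, q]
theorem splitMaxGo_first (p : List Char) :
    ∀ (fuel : Nat) (q cur : List Char) (acc : List (List Char)),
    (p ++ '-' :: q).length < fuel → ('-' ∉ p) →
    PySem.Chars.splitOnMax.go ['-'] fuel 1 (p ++ '-' :: q) cur acc
      = ((cur.reverse ++ p) :: acc).reverse ++ [q] := by
  induction p with
  | nil =>
    intro fuel q cur acc hlen hp
    cases fuel with
    | zero => simp at hlen
    | succ n =>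
      have hpre : (['-'].isPrefixOf ('-' :: q)) = true := by simp [List.isPrefixOf]
      have hstep : PySem.Chars.splitOnMax.go ['-'] (n+1) 1 ([] ++ '-' :: q) cur acc
          = PySem.Chars.splitOnMax.go ['-'] n 0 q [] (cur.reverse :: acc) := by
        simp [PySem.Chars.splitOnMax.go, hpre]
      rw [hstep]
      cases n with
      | zero => simp at hlen
      | succ n' =>
        cases q with
        | nil => simp [PySem.Chars.splitOnMax.go]
        | cons b rest => simp [PySem.Chars.splitOnMax.go]
  | cons a p ih =>
    intro fuel q cur acc hlen hp
    cases fuel with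
    | zero => simp at hlen
    | succ n =>
      have ha : a ≠ '-' := fun h => hp (by simp [h])
      have hpre : (['-'].isPrefixOf (a :: (p ++ '-' :: q))) = false := by
        simp [List.isPrefixOf]; exact fun h => absurd h.symm ha
      have hstep : PySem.Chars.splitOnMax.go ['-'] (n+1) 1 ((a :: p) ++ '-' :: q) cur acc
          = PySem.Chars.splitOnMax.go ['-'] n 1 (p ++ '-' :: q) (a :: cur) acc := by
        simp [PySem.Chars.splitOnMax.go, hpre]
      rw [hstep, ih n q (a :: cur) acc (by simp at hlen ⊢; omega)
        (fun h => hp (List.mem_cons_of_mem _ h))]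
      simp

-- first-occurrence decomposition of a list containing c
theorem exists_first_occ {c : Char} {l : List Char} (h : c ∈ l) :
    ∃ p q, l = p ++ c :: q ∧ c ∉ p := by
  induction l with
  | nil => simp at h
  | cons a rest ih =>
    by_cases ha : a = c
    · exact ⟨[], rest, by simp [ha], by simp⟩
    · have hr : c ∈ rest := by
        rcases List.mem_cons.mp h with h' | h'
        · exact absurd h'.symm ha
        · exact h'
      obtain ⟨p, q, hpq, hp⟩ := ih hr
      refine ⟨a :: p, q, by simp [hpq], ?_⟩
      intro hm
      rcases List.mem_cons.mp hm with h' | h'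
      · exact ha h'.symm
      · exact hp h'

-- the two token bodies agree on every comma-free token
theorem token_eq (n : Nat) (t : List Char) (hc : PySem.Chars.isIn [','] t = false) :
    rexpGo (n + 1) t = (match rexpBounds t with
      | some (lo, hi) => PySem.List.pyRange lo (hi + 1) 1
      | none => []) := by
  by_cases hd : '-' ∈ t
  · obtain ⟨p, q, hpq, hp⟩ := exists_first_occ hd
    have hin : PySem.Chars.isIn ['-'] t = true := by
      rw [PySem.Chars.isIn_iff_infix, singleton_infix_iff]; exact hd
    have hfind : PySem.Chars.find t ['-'] = (p.length : Int) := by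
      rw [hpq]; exact find_first p q '-' hp
    have hsplit : PySem.Chars.splitOnMax t ['-'] 1 = [p, q] := by
      rw [hpq]
      unfold PySem.Chars.splitOnMax
      rw [if_neg (by omega)]
      rw [show (1 : Int).toNat = 1 from rfl]
      rw [splitMaxGo_first p ((p ++ '-' :: q).length + 1) q [] [] (by omega) hp]
      simp
    have hlo : PySem.List.slice t none (some ((p.length : Int))) = p := by
      rw [PySem.List.slice_to_natCast, hpq]
      simp
    have hhi : PySem.List.slice t (some ((p.length : Int) + 1)) none = q := by
      rw [show (p.length : Int) + 1 = ((p.length + 1 : Nat) : Int) by push_cast; ring]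
      rw [PySem.List.slice_from_natCast, hpq]
      simp
    unfold rexpGo rexpBounds
    rw [if_neg (by rw [hc]; simp), if_pos hin, hsplit]
    simp only [hfind, hlo, hhi]
    rw [if_neg (show ¬((p.length : Int) < 0) by omega)]
    cases PySem.Int.ofChars? p <;> cases PySem.Int.ofChars? q <;> simp
  · have hni : PySem.Chars.isIn ['-'] t = false := by
      rw [PySem.Chars.isIn_eq_false_iff]
      rw [singleton_infix_iff]; exact hd
    have hfind : PySem.Chars.find t ['-'] = -1 := by
      rw [PySem.Chars.find_eq_neg_one_iff, singleton_infix_iff]; exact hd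
    unfold rexpGo rexpBounds
    rw [if_neg (by rw [hc]; simp), if_neg (by rw [hni]; simp)]
    simp only [hfind, if_pos (by omega : (-1 : Int) < 0)]
    cases hof : PySem.Int.ofChars? t with
    | none => simp
    | some v => simp [PySem.List.pyRange_one_singleton]

-- Every piece produced by splitOn.go on separator [','] is comma-free
-- (given enough fuel, a comma-free current chunk and comma-free accumulated pieces).
theorem go_mem_comma_free (fuel : Nat) :
    ∀ (l cur : List Char) (acc : List (List Char)), l.length < fuel →
    (',' ∉ cur) → (∀ u ∈ acc, ',' ∉ u) →
    ∀ t ∈ PySem.Chars.splitOn.go [','] fuel l cur acc, ',' ∉ t := by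
  induction fuel with
  | zero => intro l cur acc h; omega
  | succ n ih =>
    intro l cur acc hlen hcur hacc t ht
    cases l with
    | nil =>
      simp only [PySem.Chars.splitOn.go, List.mem_reverse, List.mem_cons] at ht
      rcases ht with h | h
      · subst h; simpa using hcur
      · exact hacc _ h
    | cons c rest =>
      by_cases hp : [','].isPrefixOf (c :: rest) = true
      · have hstep : PySem.Chars.splitOn.go [','] (n+1) (c :: rest) cur acc
            = PySem.Chars.splitOn.go [','] n (List.drop 1 (c :: rest)) [] (cur.reverse :: acc) := by
          simp [PySem.Chars.splitOn.go, hp]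
        rw [hstep] at ht
        refine ih _ _ _ (by simp at hlen ⊢; omega) (by simp) ?_ t ht
        intro u hu
        rcases List.mem_cons.mp hu with h | h
        · subst h; simpa using hcur
        · exact hacc _ h
      · have hstep : PySem.Chars.splitOn.go [','] (n+1) (c :: rest) cur acc
            = PySem.Chars.splitOn.go [','] n rest (c :: cur) acc := by
          simp [PySem.Chars.splitOn.go, hp]
        rw [hstep] at ht
        have hc : c ≠ ',' := by
          intro h; exact hp (by simp [h, List.isPrefixOf])
        refine ih _ _ _ (by simp at hlen; omega) ?_ hacc t ht
        intro h
        rcases List.mem_cons.mp h with h | h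
        · exact hc h.symm
        · exact hcur h

-- If l is comma-free, splitOn.go just closes the current chunk.
theorem go_no_comma (fuel : Nat) :
    ∀ (l cur : List Char) (acc : List (List Char)), l.length < fuel → (',' ∉ l) →
    PySem.Chars.splitOn.go [','] fuel l cur acc = ((cur.reverse ++ l) :: acc).reverse := by
  induction fuel with
  | zero => intro l cur acc h; omega
  | succ n ih =>
    intro l cur acc hlen hl
    cases l with
    | nil => simp [PySem.Chars.splitOn.go]
    | cons c rest =>
      have hc : c ≠ ',' := fun h => hl (by simp [h])
      have hp : [','].isPrefixOf (c :: rest) = false := by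
        simp [List.isPrefixOf]; exact fun h => absurd h.symm hc
      have hstep : PySem.Chars.splitOn.go [','] (n+1) (c :: rest) cur acc
          = PySem.Chars.splitOn.go [','] n rest (c :: cur) acc := by
        simp [PySem.Chars.splitOn.go, hp]
      rw [hstep, ih rest (c :: cur) acc (by simp at hlen; omega)
        (fun h => hl (List.mem_cons_of_mem _ h))]
      simp

theorem splitOn_comma_free (cs : List Char) :
    ∀ t ∈ PySem.Chars.splitOn cs [','], PySem.Chars.isIn [','] t = false := by
  intro t ht
  have := go_mem_comma_free (cs.length + 1) cs [] [] (by omega) (by simp) (by simp) t ht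
  rw [PySem.Chars.isIn_eq_false_iff]
  intro hinf
  exact this (hinf.subset (by simp))

theorem splitOn_of_no_comma (cs : List Char) (h : PySem.Chars.isIn [','] cs = false) :
    PySem.Chars.splitOn cs [','] = [cs] := by
  have hcs : ',' ∉ cs := fun hm => by
    rw [PySem.Chars.isIn_eq_false_iff, singleton_infix_iff] at h
    exact h hm
  unfold PySem.Chars.splitOn
  rw [go_no_comma (cs.length + 1) cs [] [] (by omega) hcs]
  simp

-- ===== VERDICT (by name: the statement is the Claim_ definition above) =====
theorem rexp_spec : Claim_equal_rexp := by
  intro s _ _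
  unfold Spec_rexp rexp rexp_alt
  by_cases h : PySem.Chars.isIn [','] s.toList = true
  · rw [show rexpGo (s.toList.length + 1) s.toList
        = (PySem.Chars.splitOn s.toList [',']).flatMap (fun e => rexpGo s.toList.length e) by
      simp [rexpGo, h]]
    have hne : s.toList ≠ [] := by
      intro hnil
      rw [hnil] at h
      simp [PySem.Chars.isIn, PySem.Chars.find, PySem.Chars.find.go] at h
    obtain ⟨m, hm⟩ : ∃ m, s.toList.length = m + 1 :=
      ⟨s.toList.length - 1, by cases hl : s.toList with
        | nil => exact absurd hl hne
        | cons a b => simp⟩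
    rw [hm]
    exact List.flatMap_congr (fun t ht => token_eq m t (splitOn_comma_free s.toList t ht))
  · have h' : PySem.Chars.isIn [','] s.toList = false := eq_false_of_ne_true h
    rw [splitOn_of_no_comma s.toList h']
    have := token_eq s.toList.length s.toList h'
    simp only [List.flatMap_cons, List.flatMap_nil, List.append_nil]
    exact this
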